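-- pv_equiv track=rewrite | github.com/benreynwar/zamlet | python/zamlet/utils.py | join_by_factors
-- ===== SOURCE A (Python) =====
-- def join_by_factors(values, factors):
--     assert len(values) in (len(factors) + 1, len(factors))
--     f = 1
--     total = 0
--     for value, factor in zip(values[:-1], factors):
--         assert value < factor
--         total += value * f
--         f *= factor
--     if len(values) == len(factors):
--         assert values[-1] < factors[-1]
--     total += values[-1] * f
--     return total
-- ===== SOURCE B (Python) =====
-- def join_by_factors(values, factors):
--     assert len(values) in (len(factors) + 1, len(factors))
--     # weight table: weights[i] = product of factors[:i]
--     weights = []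
--     w = 1
--     for factor in factors:
--         weights.append(w)
--         w *= factor
--     weights.append(w)
--     for value, factor in zip(values[:-1], factors):
--         assert value < factor
--     if len(values) == len(factors):
--         assert values[-1] < factors[-1]
--     return sum(v * wt for v, wt in zip(values, weights))
-- ===== Notes on version B (the rewrite author's own statement) =====
-- stated objective: alternative
-- what changed: B precomputes a prefix-product weight table from factors in a separate pass and then sums values[i]*weight[i] over a zip, instead of A's single fused loop that threads a running multiplier and special-cases the last element outside the loop.
import Mathlib
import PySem

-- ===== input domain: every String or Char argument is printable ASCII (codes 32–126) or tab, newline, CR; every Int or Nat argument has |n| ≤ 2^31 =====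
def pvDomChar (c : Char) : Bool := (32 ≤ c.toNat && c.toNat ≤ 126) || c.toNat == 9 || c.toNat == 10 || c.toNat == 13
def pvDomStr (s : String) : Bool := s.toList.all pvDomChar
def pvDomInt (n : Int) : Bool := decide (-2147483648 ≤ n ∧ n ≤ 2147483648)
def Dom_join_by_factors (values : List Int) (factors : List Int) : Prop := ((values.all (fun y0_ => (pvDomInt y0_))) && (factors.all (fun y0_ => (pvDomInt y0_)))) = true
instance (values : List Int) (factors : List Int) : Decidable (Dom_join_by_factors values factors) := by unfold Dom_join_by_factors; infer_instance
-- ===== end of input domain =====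

-- B replaces A's fused running-multiplier loop by a separate prefix-product weight-table pass followed by a sum over zip; equivalence on all inputs where A returns (asserts pass, values nonempty).

-- ===== PORT A =====
-- fused loop over zip(values[:-1], factors) threading (f, total); then total += values[-1] * f
def join_by_factors (values : List Int) (factors : List Int) : Int :=
  let st := (List.zip (PySem.List.slice values none (some (-1))) factors).foldl
      (fun (p : Int × Int) vf => (p.1 * vf.2, p.2 + vf.1 * p.1)) (1, 0)
  st.2 + ((PySem.List.pyGet? values (-1)).getD 0) * st.1
  -- values[-1]: Pre_ guarantees values ≠ [], so the .getD 0 default is never used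

-- ===== PORT B =====
-- pass 1: weight table (prefix products of factors); pass 2: sum of values[i] * weights[i]
def join_by_factors_alt (values : List Int) (factors : List Int) : Int :=
  let p := factors.foldl (fun (acc : List Int × Int) f => (acc.1 ++ [acc.2], acc.2 * f)) ([], 1)
  let weights := p.1 ++ [p.2]
  (List.zip values weights).foldl (fun s vw => s + vw.1 * vw.2) 0

-- ===== PRECONDITION & SPEC =====
-- Pre_ = exactly the inputs where A returns: the length assert passes, every zipped
-- assert value < factor passes, the equal-length last assert passes, and values ≠ []
-- (on [] A raises IndexError at values[-1]).
def Pre_join_by_factors (values : List Int) (factors : List Int) : Prop :=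
  values ≠ [] ∧
  (values.length = factors.length + 1 ∨ values.length = factors.length) ∧
  (∀ p ∈ List.zip values.dropLast factors, p.1 < p.2) ∧
  (values.length = factors.length → values.getLast! < factors.getLast!)
instance (values : List Int) (factors : List Int) : Decidable (Pre_join_by_factors values factors) := by unfold Pre_join_by_factors; infer_instance

def pvWitness_join_by_factors : List Int × List Int := ([1, 2, 3], [4, 5])

def Spec_join_by_factors (values : List Int) (factors : List Int) (out : Int) : Prop := out = join_by_factors_alt values factors
instance (values : List Int) (factors : List Int) (out : Int) : Decidable (Spec_join_by_factors values factors out) := by unfold Spec_join_by_factors; infer_instance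

-- ===== CLAIM (what is proved, stated in full; the proofs are below) =====
def Claim_equal_join_by_factors : Prop := ∀ (values : List Int) (factors : List Int), Dom_join_by_factors values factors → Pre_join_by_factors values factors → Spec_join_by_factors values factors (join_by_factors values factors)

-- ===== LEMMAS AND PROOFS =====

-- prefix-product list: wlist w [g1, g2, …] = [w, w*g1, w*g1*g2, …]
def wlist (w : Int) : List Int → List Int
  | [] => [w]
  | g :: gs => w :: wlist (w * g) gs

theorem wlist_head (w : Int) (gs : List Int) : ∃ t, wlist w gs = w :: t := by
  cases gs <;> exact ⟨_, rfl⟩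

-- B's first foldl builds exactly the prefix-product table
theorem foldl_weights (gs : List Int) (ws : List Int) (w : Int) :
    (gs.foldl (fun (acc : List Int × Int) f => (acc.1 ++ [acc.2], acc.2 * f)) (ws, w)).1 ++
      [(gs.foldl (fun (acc : List Int × Int) f => (acc.1 ++ [acc.2], acc.2 * f)) (ws, w)).2]
    = ws ++ wlist w gs := by
  induction gs generalizing ws w with
  | nil => simp [wlist]
  | cons g gs ih =>
    simp only [List.foldl_cons, wlist]
    rw [ih]
    simp

-- pulling the initial accumulator out of the sum-fold
theorem foldl_sum_shift (l : List (Int × Int)) (a : Int) :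
    l.foldl (fun s vw => s + vw.1 * vw.2) a = a + l.foldl (fun s vw => s + vw.1 * vw.2) 0 := by
  induction l generalizing a with
  | nil => simp
  | cons x xs ih => simp only [List.foldl_cons]; rw [ih, ih (0 + x.1 * x.2)]; ring

-- core lemma: A's fused loop (from accumulators w, t) equals t + B's sum over the weight table
theorem core (values : List Int) (factors : List Int) (w t : Int)
    (hne : values ≠ []) (hlen : values.length ≤ factors.length + 1) :
    (let st := (List.zip values.dropLast factors).foldl
        (fun (p : Int × Int) vf => (p.1 * vf.2, p.2 + vf.1 * p.1)) (w, t)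
     st.2 + ((PySem.List.pyGet? values (-1)).getD 0) * st.1)
    = t + (List.zip values (wlist w factors)).foldl (fun s vw => s + vw.1 * vw.2) 0 := by
  induction values generalizing factors w t with
  | nil => exact absurd rfl hne
  | cons v rest ih =>
    cases rest with
    | nil =>
      obtain ⟨tl, htl⟩ := wlist_head w factors
      simp [htl, PySem.List.pyGet?_neg_one]
    | cons v2 rest2 =>
      cases factors with
      | nil => simp at hlen
      | cons g gs =>
        have hne2 : (v2 :: rest2 : List Int) ≠ [] := by simp
        have hlen2 : (v2 :: rest2 : List Int).length ≤ gs.length + 1 := by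
          simpa using hlen
        have hdl : (v :: v2 :: rest2 : List Int).dropLast = v :: (v2 :: rest2).dropLast := rfl
        have hlast : PySem.List.pyGet? (v :: v2 :: rest2) (-1)
            = PySem.List.pyGet? (v2 :: rest2) (-1) := by
          rw [PySem.List.pyGet?_neg_one, PySem.List.pyGet?_neg_one]
          simp [List.getLast?_cons_cons]
        simp only [hdl, wlist, List.zip_cons_cons, List.foldl_cons, hlast]
        rw [ih gs (w * g) (t + v * w) hne2 hlen2]
        rw [foldl_sum_shift _ (0 + v * w)]
        ring

-- ===== VERDICT (by name: the statement is the Claim_ definition above) =====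
theorem join_by_factors_spec : Claim_equal_join_by_factors := by
  intro values factors _ hpre
  obtain ⟨hne, hlen, -, -⟩ := hpre
  unfold Spec_join_by_factors join_by_factors join_by_factors_alt
  dsimp only
  rw [PySem.List.slice_to_neg_one, foldl_weights]
  simpa using core values factors 1 0 hne (by omega)
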